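-- pv_equiv track=rewrite | github.com/zearkiatos/python-champions-league-kata | champion.py | get_goals_table
-- ===== SOURCE A (Python) =====
-- def get_goals_table(teams: dict) -> list:
--     goals_table = []
--     for i in range(0, len(teams)):
--         goals_table.append([])
--         for j in range(0, len(teams)):
--             if (i == j):
--                 goals_table[i].append(-2)
--             else:
--                 goals_table[i].append(-1)
--
--     return goals_table
-- ===== SOURCE B (Python) =====
-- def get_goals_table(teams: dict) -> list:
--     n = len(teams)
--     table = []
--     if n:
--         row = [-2] + [-1] * (n - 1)
--         table.append(row)
--         for _ in range(n - 1):
--             row = [-1] + row[:-1]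
--             table.append(row)
--     return table
-- ===== Notes on version B (the rewrite author's own statement) =====
-- stated objective: alternative
-- what changed: Replaces the nested index loops with a rolling-row construction: the first row is [-2,-1,...,-1] and each subsequent row is the previous row shifted right by one ([-1] + row[:-1]), so there is no diagonal test and no per-cell inner loop.
import Mathlib
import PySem

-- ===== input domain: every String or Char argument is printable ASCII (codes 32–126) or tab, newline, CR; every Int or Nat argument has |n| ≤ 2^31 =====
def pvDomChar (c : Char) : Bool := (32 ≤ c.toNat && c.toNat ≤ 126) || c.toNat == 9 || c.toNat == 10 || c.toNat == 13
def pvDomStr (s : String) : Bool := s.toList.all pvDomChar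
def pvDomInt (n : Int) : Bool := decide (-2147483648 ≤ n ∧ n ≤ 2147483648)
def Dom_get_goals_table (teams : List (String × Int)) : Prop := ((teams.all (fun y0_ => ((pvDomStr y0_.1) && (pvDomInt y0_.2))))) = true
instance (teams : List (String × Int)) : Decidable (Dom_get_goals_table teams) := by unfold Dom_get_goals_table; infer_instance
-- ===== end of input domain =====

-- B builds the table by a rolling-row construction (first row [-2,-1,...], each next row is the
-- previous row shifted right by one) instead of A's index-based nested loops (alternative).
-- ===== PORT A =====
-- literal port of A; outer loop index i comes from range(0,n) so it is nonnegative and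
-- goals_table[i] is slot i.toNat (exact here)
def get_goals_table (teams : List (String × Int)) : List (List Int) :=
  (PySem.List.pyRange 0 (teams.length : Int) 1).foldl
    (fun gt i =>
      let gt := gt ++ [[]]
      (PySem.List.pyRange 0 (teams.length : Int) 1).foldl
        (fun gt j =>
          gt.set i.toNat ((gt.getD i.toNat []) ++ [if i = j then (-2 : Int) else -1]))
        gt)
    []

-- ===== PORT B =====
-- literal port of Source B: row[:-1] is List.dropLast (exact for [:-1]); the loop carries (table, row)
def get_goals_table_alt (teams : List (String × Int)) : List (List Int) :=
  let n := teams.length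
  if n = 0 then []
  else
    let row0 : List Int := [-2] ++ List.replicate (n - 1) (-1)
    ((List.range (n - 1)).foldl
      (fun (s : List (List Int) × List Int) _ =>
        let row := [-1] ++ s.2.dropLast
        (s.1 ++ [row], row))
      ([row0], row0)).1

-- ===== PRECONDITION & SPEC =====
def Spec_get_goals_table (teams : List (String × Int)) (out : List (List Int)) : Prop := out = get_goals_table_alt teams
instance (teams : List (String × Int)) (out : List (List Int)) : Decidable (Spec_get_goals_table teams out) := by unfold Spec_get_goals_table; infer_instance

-- ===== CLAIM (what is proved, stated in full; the proofs are below) =====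
def Claim_equal_get_goals_table : Prop := ∀ (teams : List (String × Int)), Dom_get_goals_table teams → Spec_get_goals_table teams (get_goals_table teams)

-- ===== LEMMAS AND PROOFS =====
-- inner loop: appending cells one by one into slot i is setting slot i to the old row ++ all cells
theorem inner_fold {f : Int → Int} (i : Nat) (js : List Int) (gt : List (List Int))
    (hi : i < gt.length) :
    js.foldl (fun gt j => gt.set i ((gt.getD i []) ++ [f j])) gt
      = gt.set i ((gt.getD i []) ++ js.map f) := by
  induction js generalizing gt with
  | nil =>
    simp only [List.foldl_nil, List.map_nil, List.append_nil]
    rw [List.getD_eq_getElem _ _ hi, List.set_getElem_self]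
  | cons j js ih =>
    simp only [List.foldl_cons, List.map_cons]
    rw [ih _ (by simpa using hi)]
    simp [List.getElem_set_self, hi, List.set_set]

def pvRow (n i : Nat) : List Int :=
  (PySem.List.pyRange 0 (n : Int) 1).map (fun j => if (i : Int) = j then (-2 : Int) else -1)

theorem row_eq (n i : Nat) :
    pvRow n i = (List.replicate n (-1 : Int)).set i (-2) := by
  apply List.ext_getElem
  · simp [pvRow, PySem.List.length_pyRange_one]
  · intro k h1 h2
    simp only [pvRow, List.getElem_map, PySem.List.getElem_pyRange_one, List.getElem_set,
      List.getElem_replicate]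
    have hk : k < n := by simpa using h2
    simp only [zero_add]
    by_cases h : i = k <;> simp [h]

theorem outer_fold (N : Nat) : ∀ (k : Nat), k ≤ N →
    (PySem.List.pyRange 0 (k : Int) 1).foldl
      (fun gt i =>
        let gt := gt ++ [[]]
        (PySem.List.pyRange 0 (N : Int) 1).foldl
          (fun gt j =>
            gt.set i.toNat ((gt.getD i.toNat []) ++ [if i = j then (-2 : Int) else -1]))
          gt)
      []
    = (List.range k).map (fun i => pvRow N i) := by
  intro k hk
  induction k with
  | zero => simp [PySem.List.pyRange_zero_nat]
  | succ k ih =>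
    have hsr : PySem.List.pyRange 0 ((k : Int) + 1) 1
        = PySem.List.pyRange 0 (k : Int) 1 ++ [(k : Int)] :=
      PySem.List.pyRange_one_succ_right (by positivity)
    have hk' : k ≤ N := Nat.le_of_succ_le hk
    push_cast
    rw [hsr, List.foldl_append, ih hk']
    simp only [List.foldl_cons, List.foldl_nil]
    simp only [Int.toNat_natCast]
    rw [inner_fold k _ _ (by simp)]
    have hget : (((List.range k).map (fun i => pvRow N i) ++ [([] : List Int)]).getD
        k []) = [] := by
      simp [List.getD_eq_getElem?_getD]
    rw [hget]
    rw [List.range_succ, List.map_append]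
    rw [List.set_append_right _ _ (by simp)]
    simp [pvRow]

def pvRowB (n i : Nat) : List Int := (List.replicate n (-1 : Int)).set i (-2)

-- shifting a diagonal row right by one moves the -2 one slot further
theorem shift_row (n k : Nat) (h : k + 1 < n) :
    (-1 : Int) :: (pvRowB n k).dropLast = pvRowB n (k + 1) := by
  apply List.ext_getElem
  · simp [pvRowB]; omega
  · intro j h1 h2
    match j with
    | 0 => simp [pvRowB, List.getElem_set]
    | j + 1 =>
      have hj : j < n - 1 := by simp [pvRowB] at h1; omega
      simp only [List.getElem_cons_succ, pvRowB, List.getElem_dropLast, List.getElem_set,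
        List.getElem_replicate]
      by_cases hk : k = j <;> simp [hk] <;> omega

-- loop invariant of B's rolling construction
theorem loop_eq (n : Nat) : ∀ (m : Nat), m + 1 ≤ n →
    ((List.range m).foldl
      (fun (s : List (List Int) × List Int) _ =>
        let row := [-1] ++ s.2.dropLast
        (s.1 ++ [row], row))
      ([pvRowB n 0], pvRowB n 0))
    = ((List.range (m + 1)).map (pvRowB n), pvRowB n m) := by
  intro m hm
  induction m with
  | zero => simp
  | succ m ih =>
    rw [List.range_succ, List.foldl_append, ih (by omega)]
    simp only [List.foldl_cons, List.foldl_nil]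
    have hs : [(-1 : Int)] ++ (pvRowB n m).dropLast = pvRowB n (m + 1) := by
      simpa using shift_row n m (by omega)
    rw [hs]
    simp [List.range_succ]

-- B computes the row-indexed map
theorem build_eq (n : Nat) :
    (if n = 0 then []
     else
       let row0 : List Int := [-2] ++ List.replicate (n - 1) (-1)
       ((List.range (n - 1)).foldl
         (fun (s : List (List Int) × List Int) _ =>
           let row := [-1] ++ s.2.dropLast
           (s.1 ++ [row], row))
         ([row0], row0)).1)
    = (List.range n).map (fun i => (List.replicate n (-1 : Int)).set i (-2)) := by
  by_cases h : n = 0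
  · simp [h]
  · have hrow0 : ([-2] ++ List.replicate (n - 1) (-1 : Int)) = pvRowB n 0 := by
      match n, h with
      | n + 1, _ => simp [pvRowB, List.replicate_succ]
    simp only [h, if_false, hrow0]
    rw [loop_eq n (n - 1) (by omega)]
    have : n - 1 + 1 = n := by omega
    rw [this]
    rfl

-- ===== VERDICT (by name: the statement is the Claim_ definition above) =====
theorem get_goals_table_spec : Claim_equal_get_goals_table := by
  intro teams _
  unfold Spec_get_goals_table get_goals_table get_goals_table_alt
  rw [outer_fold teams.length teams.length le_rfl, build_eq]
  exact List.map_congr_left (fun i hi => row_eq teams.length i)
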